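-- pv_equiv track=rewrite | github.com/billcates/interview_prep | Day168/python2/solution.py | trimTrailingVowels
-- ===== SOURCE A (Python) =====
-- def trimTrailingVowels(s: str) -> str:
--     vowels={'a','e','i','o','u'}
--
--     l=len(s)
--     val=-1
--     for i in range(l-1,-1,-1):
--         if s[i] not in vowels:
--             val=i
--             break
--
--     return s[:val+1]
-- ===== SOURCE B (Python) =====
-- def trimTrailingVowels(s: str) -> str:
--     # Forward single pass: vowels are held in a pending buffer and only
--     # committed to the output when a later non-vowel proves they are not trailing.
--     vowels = {'a', 'e', 'i', 'o', 'u'}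
--     out = []
--     buf = []
--     for c in s:
--         if c in vowels:
--             buf.append(c)
--         else:
--             out += buf
--             out.append(c)
--             buf = []
--     return ''.join(out)
-- ===== Notes on version B (the rewrite author's own statement) =====
-- stated objective: alternative
-- what changed: Replaces A's backward index scan with sentinel and slice by a forward single pass that buffers runs of vowels and flushes them into the output only when a later non-vowel appears, so trailing vowels are never emitted.
import Mathlib
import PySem

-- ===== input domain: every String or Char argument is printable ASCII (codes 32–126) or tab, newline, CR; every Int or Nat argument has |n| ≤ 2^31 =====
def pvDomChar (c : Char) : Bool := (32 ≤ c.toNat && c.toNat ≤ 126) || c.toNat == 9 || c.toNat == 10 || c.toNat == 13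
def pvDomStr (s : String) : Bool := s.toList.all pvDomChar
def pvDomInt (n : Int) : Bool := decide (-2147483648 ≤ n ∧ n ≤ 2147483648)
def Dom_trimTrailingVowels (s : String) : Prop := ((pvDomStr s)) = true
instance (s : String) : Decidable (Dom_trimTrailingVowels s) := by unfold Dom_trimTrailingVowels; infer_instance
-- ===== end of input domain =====

-- B replaces A's backward index scan (sentinel -1, break, slice) by a forward single
-- pass that buffers runs of vowels and flushes them only when a later non-vowel appears.

-- ===== PORT A =====
-- the vowel set membership test 's[i] not in vowels'
def pvIsVowel (c : Char) : Bool := c ∈ ['a', 'e', 'i', 'o', 'u']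

-- the 'for i in range(l-1,-1,-1): if s[i] not in vowels: val=i; break' loop:
-- argument n is the number of indices still to visit (i = n-1 down to 0); returns val
def pvScan (cs : List Char) : Nat → Int
  | 0 => -1
  | n + 1 =>
    match PySem.List.pyGet? cs (n : Int) with
    | some c => if !(pvIsVowel c) then (n : Int) else pvScan cs n
    | none => -1   -- unreachable: n < len(s)

def trimTrailingVowels (s : String) : String :=
  let l := s.toList.length    -- len(s)
  let val := pvScan s.toList l
  PySem.Str.slice s none (some (val + 1))

-- ===== PORT B =====
-- one loop step: a vowel is appended to the pending buffer, a non-vowel flushes it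
def pvStep (st : List Char × List Char) (c : Char) : List Char × List Char :=
  if pvIsVowel c then (st.1, st.2 ++ [c]) else (st.1 ++ st.2 ++ [c], [])

def trimTrailingVowels_alt (s : String) : String :=
  String.ofList (s.toList.foldl pvStep ([], [])).1

-- ===== PRECONDITION & SPEC =====
def Spec_trimTrailingVowels (s : String) (out : String) : Prop := out = trimTrailingVowels_alt s
instance (s : String) (out : String) : Decidable (Spec_trimTrailingVowels s out) := by unfold Spec_trimTrailingVowels; infer_instance

-- ===== CLAIM (what is proved, stated in full; the proofs are below) =====
def Claim_equal_trimTrailingVowels : Prop := ∀ (s : String), Dom_trimTrailingVowels s → Spec_trimTrailingVowels s (trimTrailingVowels s)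

-- ===== LEMMAS AND PROOFS =====

-- A's scan: the slice take-bound equals rdropWhile of the prefix scanned so far
lemma pvScan_take (cs : List Char) (n : Nat) (hn : n ≤ cs.length) :
    cs.take (pvScan cs n + 1).toNat = List.rdropWhile pvIsVowel (cs.take n) := by
  induction n with
  | zero => simp [pvScan, List.rdropWhile]
  | succ n ih =>
    have hlt : n < cs.length := hn
    have hget : PySem.List.pyGet? cs (n : Int) = some cs[n] := by
      simp [PySem.List.pyGet?, PySem.List.pyIdx?, hlt]
    have htake : cs.take (n + 1) = cs.take n ++ [cs[n]] := by
      rw [List.take_add_one]; simp [hlt]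
    have hnat : ((n : Int) + 1).toNat = n + 1 := by omega
    rw [htake, List.rdropWhile_concat]
    simp only [pvScan, hget]
    by_cases hv : pvIsVowel cs[n]
    · rw [if_neg (by simp [hv]), ih (Nat.le_of_lt hlt), if_pos hv]
    · rw [if_pos (by simp [hv]), hnat, htake, if_neg (by simp [hv])]

lemma pvScan_ge (cs : List Char) (n : Nat) : -1 ≤ pvScan cs n := by
  induction n with
  | zero => simp [pvScan]
  | succ n ih =>
    simp only [pvScan]
    cases hg : PySem.List.pyGet? cs (n : Int) with
    | none => simp
    | some c => split <;> omega

-- rdropWhile past a non-satisfying element in the middle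
lemma rdropWhile_middle (p : Char → Bool) (l1 : List Char) (c : Char) (hc : ¬ p c = true)
    (l2 : List Char) :
    List.rdropWhile p (l1 ++ c :: l2) = l1 ++ c :: List.rdropWhile p l2 := by
  induction l2 using List.reverseRecOn with
  | nil =>
    have h0 : l1 ++ c :: [] = l1 ++ [c] := by simp
    rw [h0, List.rdropWhile_concat_neg p l1 c hc]; simp
  | append_singleton l2' x ih =>
    by_cases hx : p x = true
    · have h1 : l1 ++ c :: (l2' ++ [x]) = (l1 ++ c :: l2') ++ [x] := by simp
      rw [h1, List.rdropWhile_concat_pos p _ x hx, List.rdropWhile_concat_pos p _ x hx, ih]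
    · have h1 : l1 ++ c :: (l2' ++ [x]) = (l1 ++ c :: l2') ++ [x] := by simp
      rw [h1, List.rdropWhile_concat_neg p _ x hx, List.rdropWhile_concat_neg p _ x hx]
      simp

-- B's fold invariant: if the pending buffer is all vowels, the committed output plus
-- rdropWhile of (buffer ++ rest) is the final committed output
lemma pvFold_out (cs out buf : List Char) (hb : ∀ x ∈ buf, pvIsVowel x = true) :
    (cs.foldl pvStep (out, buf)).1 = out ++ List.rdropWhile pvIsVowel (buf ++ cs) := by
  induction cs generalizing out buf with
  | nil =>
    simp [List.rdropWhile_eq_nil_iff.mpr hb]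
  | cons c cs ih =>
    by_cases hv : pvIsVowel c = true
    · rw [List.foldl_cons]
      have hstep : pvStep (out, buf) c = (out, buf ++ [c]) := by simp [pvStep, hv]
      have hb' : ∀ x ∈ buf ++ [c], pvIsVowel x = true := by
        intro x hx
        rcases List.mem_append.1 hx with h | h
        · exact hb x h
        · simp at h; subst h; exact hv
      rw [hstep, ih out (buf ++ [c]) hb']
      simp
    · rw [List.foldl_cons]
      have hstep : pvStep (out, buf) c = (out ++ buf ++ [c], []) := by simp [pvStep, hv]
      rw [hstep, ih _ [] (by intro x hx; simp at hx), rdropWhile_middle pvIsVowel buf c hv cs]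
      simp

-- ===== VERDICT (by name: the statement is the Claim_ definition above) =====
theorem trimTrailingVowels_spec : Claim_equal_trimTrailingVowels := by
  intro s _
  unfold Spec_trimTrailingVowels trimTrailingVowels trimTrailingVowels_alt
  have h := pvScan_take s.toList s.toList.length (le_refl _)
  rw [List.take_length] at h
  have hb : (0 : Int) ≤ pvScan s.toList s.toList.length + 1 := by
    have := pvScan_ge s.toList s.toList.length
    omega
  apply String.ext
  rw [PySem.Str.toList_slice]
  simp only [PySem.Chars.slice_eq_listSlice]
  rw [PySem.List.slice_to _ hb]
  rw [pvFold_out s.toList [] [] (by intro x hx; simp at hx)]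
  simpa using h
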